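-- pv_equiv track=rewrite | github.com/SS4G/master_graduate | src/fpga_cnn/float2fix/float2fix_explore.py | sub_1
-- ===== SOURCE A (Python) =====
-- def sub_1(binStr):
--     """
--     对无符号数执行减一操作
--     :param binStr:
--     :param bits:
--     :return:
--     """
--     res = list(binStr)
--     i = len(binStr) - 1
--     while i >= 0:
--         if res[i] == '1':
--             res[i] = '0'
--             break
--         else:
--             res[i] = '1'
--         i -= 1
--     return ''.join(res)
-- ===== SOURCE B (Python) =====
-- def sub_1(binStr):
--     idx = binStr.rfind('1')
--     if idx == -1:
--         return '1' * len(binStr)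
--     return binStr[:idx] + '0' + '1' * (len(binStr) - idx - 1)
-- ===== Notes on version B (the rewrite author's own statement) =====
-- stated objective: faster
-- what changed: B locates the rightmost one-bit with rfind and rebuilds the result by string slicing/concatenation (untouched prefix, flipped bit, all-ones suffix) instead of A's char-by-char right-to-left scan mutating a list and re-joining it.
import Mathlib
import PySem

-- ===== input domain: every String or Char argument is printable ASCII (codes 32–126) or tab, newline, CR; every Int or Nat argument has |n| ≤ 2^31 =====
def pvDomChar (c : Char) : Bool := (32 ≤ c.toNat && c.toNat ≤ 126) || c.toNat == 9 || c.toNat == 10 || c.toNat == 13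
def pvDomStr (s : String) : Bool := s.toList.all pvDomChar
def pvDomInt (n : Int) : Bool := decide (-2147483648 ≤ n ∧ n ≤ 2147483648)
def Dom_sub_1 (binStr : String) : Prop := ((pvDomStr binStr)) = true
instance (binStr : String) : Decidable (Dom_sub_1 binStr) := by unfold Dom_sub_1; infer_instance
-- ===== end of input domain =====

-- B finds the rightmost '1' (rfind) and rebuilds the result as prefix ++ "0" ++ all-ones suffix,
-- instead of A's right-to-left scan mutating a char list; C-level rfind/slicing replaces a Python-level per-char loop (measured faster in a timing run).


-- ===== PORT A =====
-- A's while loop walks i from the last index down, turning each non-'1' into '1' and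
-- stopping after flipping the first '1' to '0'.  One loop iteration = one step of this
-- recursion over the reversed char list; the final ''.join(res) is the reverse back.
def sub1AStep : List Char → List Char
  | [] => []
  | c :: rest => if c = '1' then '0' :: rest else '1' :: sub1AStep rest

def sub_1 (binStr : String) : String :=
  String.ofList (sub1AStep binStr.toList.reverse).reverse

-- ===== PORT B =====
-- binStr.rfind('1'): index of the last '1', none if absent (Python's -1 branch).
def sub1Rfind (l : List Char) : Option Nat :=
  match l.reverse.findIdx? (· = '1') with
  | none => none
  | some j => some (l.length - 1 - j)

def sub_1_alt (binStr : String) : String :=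
  let l := binStr.toList
  match sub1Rfind l with
  | none => String.ofList (List.replicate l.length '1')
  | some idx => String.ofList (l.take idx ++ '0' :: List.replicate (l.length - idx - 1) '1')

-- ===== PRECONDITION & SPEC =====
def Spec_sub_1 (binStr : String) (out : String) : Prop := out = sub_1_alt binStr
instance (binStr : String) (out : String) : Decidable (Spec_sub_1 binStr out) := by unfold Spec_sub_1; infer_instance

-- ===== CLAIM (what is proved, stated in full; the proofs are below) =====
def Claim_equal_sub_1 : Prop := ∀ (binStr : String), Dom_sub_1 binStr → Spec_sub_1 binStr (sub_1 binStr)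

-- ===== LEMMAS AND PROOFS =====

-- Characterisation of A's scan by the position of the first '1' in the (reversed) list.
theorem sub1AStep_eq (r : List Char) :
    sub1AStep r = match r.findIdx? (· = '1') with
      | none => List.replicate r.length '1'
      | some j => List.replicate j '1' ++ '0' :: r.drop (j + 1) := by
  induction r with
  | nil => simp [sub1AStep]
  | cons c t ih =>
    by_cases hc : c = '1'
    · simp [sub1AStep, hc, List.findIdx?_cons]
    · simp only [sub1AStep, List.findIdx?_cons, decide_eq_true_eq, hc, if_false, ih]
      cases h : t.findIdx? (· = '1') with
      | none => simp [List.replicate_succ]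
      | some j => simp [List.replicate_succ]

theorem sub_1_spec : Claim_equal_sub_1 := by
  intro s _
  show sub_1 s = sub_1_alt s
  unfold sub_1 sub_1_alt sub1Rfind
  rw [sub1AStep_eq]
  cases h : s.toList.reverse.findIdx? (· = '1') with
  | none => simp only [h]; simp
  | some j =>
    have hj : j < s.toList.length := by
      have := List.findIdx?_eq_some_iff_findIdx_eq.mp h
      simpa using this.1
    simp only [h]
    congr 1
    rw [List.reverse_append, List.reverse_replicate, List.reverse_cons, List.drop_reverse,
        List.reverse_reverse]
    have h1 : s.toList.length - (j + 1) = s.toList.length - 1 - j := by omega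
    have h2 : s.toList.length - (s.toList.length - 1 - j) - 1 = j := by omega
    rw [h1, h2]
    simp
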